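-- pv_equiv track=rewrite | github.com/Cyese/JSSP-with-ABC-optimization-and-ML-reschedule | ultilities.py | split_task
-- ===== SOURCE A (Python) =====
-- def split_task(arr: list) -> tuple:
--     arr2 = list(arr)
--     first = []
--     second = []
--     for _ in range(3):
--         first.append(arr.index(arr2.pop(arr2.index(max(arr2)))))
--     for i in arr2:
--         second.append(arr.index(i))
--     return first, second
-- ===== SOURCE B (Python) =====
-- def split_task(arr: list) -> tuple:
--     ordered = sorted(arr, reverse=True)
--     top = ordered[:3]
--     first = [arr.index(v) for v in top]
--     budget = {}
--     for v in top:
--         budget[v] = budget.get(v, 0) + 1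
--     second = []
--     for x in arr:
--         if budget.get(x, 0) > 0:
--             budget[x] = budget.get(x, 0) - 1
--         else:
--             second.append(arr.index(x))
--     return first, second
-- ===== Notes on version B (the rewrite author's own statement) =====
-- stated objective: alternative
-- what changed: A selects the three largest by repeatedly scanning arr2 for its max and popping it; B sorts arr once in descending order, takes the first three values, and removes their first occurrences in a single counter-budget pass over arr in original order.
import Mathlib
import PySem

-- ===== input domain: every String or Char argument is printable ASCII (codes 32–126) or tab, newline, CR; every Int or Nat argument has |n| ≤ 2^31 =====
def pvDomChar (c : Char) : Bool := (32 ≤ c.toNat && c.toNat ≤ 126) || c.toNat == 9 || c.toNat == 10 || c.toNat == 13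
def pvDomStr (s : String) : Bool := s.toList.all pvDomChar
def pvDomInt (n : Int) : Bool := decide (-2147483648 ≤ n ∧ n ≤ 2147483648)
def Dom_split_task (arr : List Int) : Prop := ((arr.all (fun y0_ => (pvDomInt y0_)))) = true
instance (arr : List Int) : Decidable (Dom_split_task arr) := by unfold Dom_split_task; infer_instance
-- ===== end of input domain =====

-- B replaces A's repeated max-scan-and-pop selection by one descending sort plus a single
-- budget-counting pass over arr (objective: alternative decomposition of the same task).

-- ===== PORT A =====
-- the 'for _ in range(3)' loop: each iteration pops the max of arr2 and appends arr.index of it;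
-- 'none' marks where Python raises (max() of an empty sequence, when len(arr) < 3)
def splitGo (arr : List Int) : Nat → List Int → List Int → Option (List Int × List Int)
  | 0, arr2, first => some (first, arr2)
  | n+1, arr2, first =>
    match PySem.List.max? arr2 (fun x => x) with
    | none => none
    | some m =>
      match PySem.List.index? arr2 m with
      | none => none
      | some i =>
        match PySem.List.pop? arr2 (i : Int) with
        | none => none
        | some r =>
          match PySem.List.index? arr r.1 with
          | none => none
          | some j => splitGo arr n r.2 (first ++ [(j : Int)])

def split_task (arr : List Int) : List Int × List Int :=
  match splitGo arr 3 arr [] with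
  | none => ([], [])   -- unreachable inside Pre_ (A raises ValueError exactly when len(arr) < 3)
  | some r =>
    -- 'for i in arr2: second.append(arr.index(i))'; every i is in arr, so index? is always some
    (r.1, r.2.foldl (fun acc i => acc ++ [(((PySem.List.index? arr i).getD 0 : Nat) : Int)]) [])

-- ===== PORT B =====
-- one step of Source B's budget walk over arr
def altStep (arr : List Int) (p : List Int × PySem.Dict Int Int) (x : Int) :
    List Int × PySem.Dict Int Int :=
  if 0 < p.2.getD x 0 then (p.1, p.2.insert x (p.2.getD x 0 - 1))
  else (p.1 ++ [(((PySem.List.index? arr x).getD 0 : Nat) : Int)], p.2)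

def split_task_alt (arr : List Int) : List Int × List Int :=
  let ordered := PySem.List.sorted arr (fun x => x) true
  let top := PySem.List.slice ordered none (some 3)
  let first := top.map (fun v => (((PySem.List.index? arr v).getD 0 : Nat) : Int))
  let budget := top.foldl (fun d v => d.insert v (d.getD v 0 + 1))
      (PySem.Dict.empty : PySem.Dict Int Int)
  let walk := arr.foldl (altStep arr) (([] : List Int), budget)
  (first, walk.1)

-- ===== PRECONDITION & SPEC =====
-- A raises ValueError (max() of an empty sequence) exactly when len(arr) < 3; nothing else is excluded.
def Pre_split_task (arr : List Int) : Prop := 3 ≤ arr.length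
instance (arr : List Int) : Decidable (Pre_split_task arr) := by unfold Pre_split_task; infer_instance
def pvWitness_split_task : List Int := [3, 1, 2]

def Spec_split_task (arr : List Int) (out : List Int × List Int) : Prop := out = split_task_alt arr
instance (arr : List Int) (out : List Int × List Int) : Decidable (Spec_split_task arr out) := by unfold Spec_split_task; infer_instance

-- ===== CLAIM (what is proved, stated in full; the proofs are below) =====
def Claim_equal_split_task : Prop := ∀ (arr : List Int), Dom_split_task arr → Pre_split_task arr → Spec_split_task arr (split_task arr)

-- ===== LEMMAS AND PROOFS =====

-- the index-of-first-occurrence map both sides append with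
def idxI (arr : List Int) (v : Int) : Int := (((PySem.List.index? arr v).getD 0 : Nat) : Int)

-- pure description of Source B's budget walk: drop each first occurrence still in the budget ts
def keepL : List Int → List Int → List Int
  | [], _ => []
  | x :: l, ts => if x ∈ ts then keepL l (ts.erase x) else x :: keepL l ts

lemma foldl_erase_nil (ts : List Int) : ts.foldl List.erase ([] : List Int) = [] := by
  induction ts with
  | nil => rfl
  | cons t ts ih => simpa [List.erase_nil] using ih

lemma foldl_erase_cons_not_mem (ts : List Int) (x : Int) (h : x ∉ ts) :
    ∀ l : List Int, ts.foldl List.erase (x :: l) = x :: ts.foldl List.erase l := by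
  induction ts with
  | nil => intro l; rfl
  | cons t ts ih =>
    intro l
    have hne : ¬ (x = t) := fun he => h (he ▸ List.mem_cons_self)
    have h' : x ∉ ts := fun hm => h (List.mem_cons_of_mem _ hm)
    have hc : (x :: l).erase t = x :: l.erase t := by simp [hne]
    simp only [List.foldl_cons, hc]
    exact ih h' (l.erase t)

lemma foldl_erase_mem (ts : List Int) (x : Int) (h : x ∈ ts) :
    ∀ L : List Int, ts.foldl List.erase L = (ts.erase x).foldl List.erase (L.erase x) := by
  induction ts with
  | nil => exact absurd h (List.not_mem_nil)
  | cons t ts ih =>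
    intro L
    by_cases he : t = x
    · subst he; simp [List.erase_cons_head]
    · have hx : x ∈ ts := by
        rcases List.mem_cons.mp h with h1 | h1
        · exact absurd h1.symm he
        · exact h1
      have hc : (t :: ts).erase x = t :: ts.erase x := by simp [he]
      rw [hc]
      simp only [List.foldl_cons]
      rw [ih hx (L.erase t), List.erase_comm]

lemma keepL_eq_foldl_erase (l : List Int) : ∀ ts : List Int, keepL l ts = ts.foldl List.erase l := by
  induction l with
  | nil => intro ts; simp [keepL, foldl_erase_nil]
  | cons x l ih =>
    intro ts
    by_cases hx : x ∈ ts
    · rw [foldl_erase_mem ts x hx (x :: l), List.erase_cons_head]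
      simp [keepL, hx, ih]
    · rw [foldl_erase_cons_not_mem ts x hx l]
      simp [keepL, hx, ih]

lemma walk_fst (arr : List Int) : ∀ (l ts acc : List Int) (b : PySem.Dict Int Int),
    (∀ v, b.getD v 0 = (ts.count v : Int)) →
    (l.foldl (altStep arr) (acc, b)).1 = acc ++ (keepL l ts).map (idxI arr) := by
  intro l
  induction l with
  | nil => intro ts acc b _; simp [keepL]
  | cons x l ih =>
    intro ts acc b hb
    by_cases hx : x ∈ ts
    · have hc : 1 ≤ ts.count x := List.one_le_count_iff.mpr hx
      have hpos : 0 < b.getD x 0 := by rw [hb x]; exact_mod_cast hc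
      have hstep : altStep arr (acc, b) x = (acc, b.insert x (b.getD x 0 - 1)) := by
        simp [altStep, hpos]
      rw [List.foldl_cons, hstep]
      have hb' : ∀ v, (b.insert x (b.getD x 0 - 1)).getD v 0 = ((ts.erase x).count v : Int) := by
        intro v
        rw [PySem.Dict.getD_insert]
        by_cases hv : v = x
        · subst hv; rw [if_pos rfl, hb v, List.count_erase_self]; push_cast [hc]; omega
        · rw [if_neg hv, hb v, List.count_erase_of_ne hv]
      rw [ih (ts.erase x) acc _ hb']
      simp [keepL, hx]
    · have hz : ts.count x = 0 := List.count_eq_zero_of_not_mem hx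
      have hnpos : ¬ 0 < b.getD x 0 := by rw [hb x, hz]; omega
      have hstep : altStep arr (acc, b) x = (acc ++ [idxI arr x], b) := by
        simp [altStep, hnpos, idxI]
      rw [List.foldl_cons, hstep, ih ts _ b hb]
      simp [keepL, hx, idxI]

def msorted (l : List Int) : List Int := PySem.List.sorted l (fun x => x) true

lemma msorted_unique (xs t : List Int) (hp : t.Perm xs) (hs : t.Pairwise (fun a b => b ≤ a)) :
    msorted xs = t := by
  have h1 : (msorted xs).Perm xs := PySem.List.sorted_perm xs (fun x => x) true
  have h2 := PySem.List.sorted_pairwise_rev xs (fun x => x)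
  have hrev : (msorted xs).reverse = t.reverse := by
    apply PySem.List.eq_of_perm_of_pairwise_le_of_injective (fun x => x) (fun a b h => h)
    · exact ((msorted xs).reverse_perm.trans (h1.trans hp.symm)).trans t.reverse_perm.symm
    · exact List.pairwise_reverse.mpr h2
    · exact List.pairwise_reverse.mpr hs
  simpa using congrArg List.reverse hrev

lemma msorted_cons (l : List Int) (m : Int) (h : PySem.List.max? l (fun x => x) = some m) :
    msorted l = m :: msorted (l.erase m) := by
  have hm : m ∈ l := PySem.List.max?_mem h
  apply msorted_unique
  · exact (List.Perm.cons m (PySem.List.sorted_perm _ _ _)).trans (List.perm_cons_erase hm).symm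
  · rw [List.pairwise_cons]
    refine ⟨fun y hy => ?_, PySem.List.sorted_pairwise_rev _ _⟩
    have hyl : y ∈ l.erase m := (PySem.List.mem_sorted _ _ _ _).mp hy
    exact PySem.List.max?_isMax h y (List.erase_subset hyl)

lemma splitGo_step (arr l first : List Int) (n : Nat) (hsub : ∀ y ∈ l, y ∈ arr) (m : Int)
    (hm : PySem.List.max? l (fun x => x) = some m) :
    splitGo arr (n+1) l first = splitGo arr n (l.erase m) (first ++ [idxI arr m]) := by
  have hml : m ∈ l := PySem.List.max?_mem hm
  have hma : m ∈ arr := hsub m hml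
  obtain ⟨k, hk⟩ := Option.isSome_iff_exists.mp ((PySem.List.index?_isSome_iff l m).mpr hml)
  obtain ⟨hklen, hlk, _⟩ := PySem.List.getElem_of_index?_eq_some hk
  have hidx : l.idxOf m = k := by
    rw [List.idxOf_eq_getD_idxOf?, ← PySem.List.index?_eq_idxOf?, hk]; rfl
  have herase : l.eraseIdx k = l.erase m := (List.erase_eq_eraseIdx_of_idxOf hidx).symm
  have hpop : PySem.List.pop? l (k : Int) = some (m, l.erase m) := by
    rw [PySem.List.pop?_natCast l k hklen, hlk, herase]
  obtain ⟨j, hj⟩ := Option.isSome_iff_exists.mp ((PySem.List.index?_isSome_iff arr m).mpr hma)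
  have hout : idxI arr m = (j : Int) := by rw [idxI, hj]; rfl
  rw [hout]
  simp only [splitGo, hm, hk, hpop, hj]

-- ===== VERDICT (by name: the statement is the Claim_ definition above) =====
theorem split_task_spec : Claim_equal_split_task := by
  intro arr _ hpre
  unfold Spec_split_task
  unfold Pre_split_task at hpre
  -- the three popped maxima and the three shrinking copies of arr2
  have h0 : arr ≠ [] := by intro h; subst h; simp at hpre
  obtain ⟨m1, hm1⟩ := Option.ne_none_iff_exists'.mp
    (fun h => h0 ((PySem.List.max?_eq_none_iff arr (fun x => x)).mp h))
  have hm1mem : m1 ∈ arr := PySem.List.max?_mem hm1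
  have hlen1 : (arr.erase m1).length = arr.length - 1 := List.length_erase_of_mem hm1mem
  have h1 : arr.erase m1 ≠ [] := by
    intro h; rw [← List.length_eq_zero_iff] at h; omega
  obtain ⟨m2, hm2⟩ := Option.ne_none_iff_exists'.mp
    (fun h => h1 ((PySem.List.max?_eq_none_iff (arr.erase m1) (fun x => x)).mp h))
  have hm2mem : m2 ∈ arr.erase m1 := PySem.List.max?_mem hm2
  have hlen2 : ((arr.erase m1).erase m2).length = (arr.erase m1).length - 1 :=
    List.length_erase_of_mem hm2mem
  have h2 : (arr.erase m1).erase m2 ≠ [] := by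
    intro h; rw [← List.length_eq_zero_iff] at h; omega
  obtain ⟨m3, hm3⟩ := Option.ne_none_iff_exists'.mp
    (fun h => h2 ((PySem.List.max?_eq_none_iff ((arr.erase m1).erase m2) (fun x => x)).mp h))
  have hs1 : ∀ y ∈ arr.erase m1, y ∈ arr := fun y hy => List.erase_subset hy
  have hs2 : ∀ y ∈ (arr.erase m1).erase m2, y ∈ arr := fun y hy => hs1 y (List.erase_subset hy)
  -- A's value
  have hA : split_task arr =
      ([idxI arr m1, idxI arr m2, idxI arr m3],
       (((arr.erase m1).erase m2).erase m3).map (idxI arr)) := by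
    unfold split_task
    rw [show (3 : Nat) = 2 + 1 from rfl, splitGo_step arr arr [] 2 (fun y h => h) m1 hm1,
        show (2 : Nat) = 1 + 1 from rfl, splitGo_step arr (arr.erase m1) _ 1 hs1 m2 hm2,
        show (1 : Nat) = 0 + 1 from rfl, splitGo_step arr ((arr.erase m1).erase m2) _ 0 hs2 m3 hm3]
    simp only [splitGo, PySem.List.foldl_append_singleton_eq_map]
    simp [idxI]
  -- B's value
  have hsorted : PySem.List.sorted arr (fun x => x) true =
      m1 :: m2 :: m3 :: msorted (((arr.erase m1).erase m2).erase m3) := by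
    rw [show PySem.List.sorted arr (fun x => x) true = msorted arr from rfl,
        msorted_cons arr m1 hm1, msorted_cons (arr.erase m1) m2 hm2,
        msorted_cons ((arr.erase m1).erase m2) m3 hm3]
  have hbudget : ∀ v : Int,
      (([m1, m2, m3].foldl (fun d v => d.insert v (d.getD v 0 + 1))
        (PySem.Dict.empty : PySem.Dict Int Int)).getD v 0) = (([m1, m2, m3] : List Int).count v : Int) := by
    intro v
    rw [PySem.Dict.getD_foldl_insert_add_one]
    simp
  have hB : split_task_alt arr =
      ([idxI arr m1, idxI arr m2, idxI arr m3],
       (((arr.erase m1).erase m2).erase m3).map (idxI arr)) := by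
    unfold split_task_alt
    dsimp only
    rw [hsorted, show ((3 : Int)) = ((3 : Nat) : Int) from rfl, PySem.List.slice_to_natCast]
    simp only [List.take_succ_cons, List.take_zero]
    rw [walk_fst arr arr [m1, m2, m3] [] _ hbudget, keepL_eq_foldl_erase]
    simp [idxI]
  rw [hA, hB]
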